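-- pv_equiv track=rewrite | github.com/kr2020lbh/Problem | Python/SWEA/D2/FAIL_SWEA_1928.py | decoding_4words
-- ===== SOURCE A (Python) =====
-- decodes = 'ABCDEFGHIJKLMNOPQRSTUVWXYZabcdefghijklmnopqrstuvwxyz0123456789+/'
--
-- def decoding_4words(arr):
--     result = []
--
--     for words in arr:
--         tmp=[]
--         for char in words:
--             for i in range(64):
--                 if decodes[i]==char:
--                     tmp.extend([i])
--         result.append(tmp)
--     return result
-- ===== SOURCE B (Python) =====
-- def decoding_4words(arr):
--     result = []
--     for words in arr:
--         tmp = []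
--         for char in words:
--             if 'A' <= char <= 'Z':
--                 tmp.append(ord(char) - ord('A'))
--             elif 'a' <= char <= 'z':
--                 tmp.append(ord(char) - ord('a') + 26)
--             elif '0' <= char <= '9':
--                 tmp.append(ord(char) - ord('0') + 52)
--             elif char == '+':
--                 tmp.append(62)
--             elif char == '/':
--                 tmp.append(63)
--         result.append(tmp)
--     return result
-- ===== Notes on version B (the rewrite author's own statement) =====
-- stated objective: faster
-- what changed: Replaces A's inner 64-iteration scan of the decodes table per character with O(1) arithmetic on ord(char) over the four contiguous ranges plus the two symbols, skipping unknown characters just like A's failed scan.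
import Mathlib
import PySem

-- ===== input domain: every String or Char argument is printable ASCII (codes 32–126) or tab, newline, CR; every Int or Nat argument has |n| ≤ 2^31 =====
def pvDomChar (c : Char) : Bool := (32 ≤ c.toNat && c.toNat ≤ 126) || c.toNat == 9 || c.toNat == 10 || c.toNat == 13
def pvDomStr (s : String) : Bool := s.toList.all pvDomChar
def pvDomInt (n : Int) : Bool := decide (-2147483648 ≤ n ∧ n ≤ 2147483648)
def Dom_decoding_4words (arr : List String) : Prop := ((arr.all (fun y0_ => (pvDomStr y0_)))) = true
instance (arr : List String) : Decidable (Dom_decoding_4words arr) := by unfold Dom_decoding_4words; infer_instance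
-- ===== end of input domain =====

-- B replaces A's per-character 64-iteration scan of the decodes table by O(1) arithmetic
-- on the character code over the four contiguous ranges plus '+' and '/' (objective: faster).

-- ===== PORT A =====
def pvDecodes : String := "ABCDEFGHIJKLMNOPQRSTUVWXYZabcdefghijklmnopqrstuvwxyz0123456789+/"

def decoding_4words (arr : List String) : List (List Int) :=
  arr.foldl (fun result words =>
    result ++ [words.toList.foldl (fun tmp char =>
      (PySem.List.pyRange 0 64 1).foldl (fun tmp i =>
        if PySem.Str.pyGet? pvDecodes i == some char then tmp ++ [i] else tmp) tmp) []]) []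

-- ===== PORT B =====
def decoding_4words_alt (arr : List String) : List (List Int) :=
  arr.foldl (fun result words =>
    result ++ [words.toList.foldl (fun tmp c =>
      if 'A' ≤ c ∧ c ≤ 'Z' then tmp ++ [(c.toNat : Int) - 65]
      else if 'a' ≤ c ∧ c ≤ 'z' then tmp ++ [(c.toNat : Int) - 97 + 26]
      else if '0' ≤ c ∧ c ≤ '9' then tmp ++ [(c.toNat : Int) - 48 + 52]
      else if c = '+' then tmp ++ [62]
      else if c = '/' then tmp ++ [63]
      else tmp) []]) []

-- ===== PRECONDITION & SPEC =====
def Spec_decoding_4words (arr : List String) (out : List (List Int)) : Prop := out = decoding_4words_alt arr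
instance (arr : List String) (out : List (List Int)) : Decidable (Spec_decoding_4words arr out) := by unfold Spec_decoding_4words; infer_instance

-- ===== CLAIM (what is proved, stated in full; the proofs are below) =====
def Claim_equal_decoding_4words : Prop := ∀ (arr : List String), Dom_decoding_4words arr → Spec_decoding_4words arr (decoding_4words arr)

-- ===== LEMMAS AND PROOFS =====

-- per-character result of A's inner scan, started from the empty accumulator
def pvCharA (c : Char) : List Int :=
  (PySem.List.pyRange 0 64 1).foldl (fun tmp i =>
    if PySem.Str.pyGet? pvDecodes i == some c then tmp ++ [i] else tmp) []

-- per-character result of B's arithmetic branch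
def pvCharB (c : Char) : List Int :=
  if 'A' ≤ c ∧ c ≤ 'Z' then [(c.toNat : Int) - 65]
  else if 'a' ≤ c ∧ c ≤ 'z' then [(c.toNat : Int) - 97 + 26]
  else if '0' ≤ c ∧ c ≤ '9' then [(c.toNat : Int) - 48 + 52]
  else if c = '+' then [62]
  else if c = '/' then [63]
  else []

-- A's scan rephrased as a single walk down the character list (proof helper only)
def pvScan (j : Nat) (l : List Char) (c : Char) (tmp : List Int) : List Int :=
  match l with
  | [] => tmp
  | x :: xs => pvScan (j + 1) xs c (if x == c then tmp ++ [(j : Int)] else tmp)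

theorem pvFoldScan (l : List Char) (c : Char) :
    ∀ (pre : List Char) (tmp : List Int),
      (List.range' pre.length l.length).foldl
        (fun t k => if (pre ++ l)[k]? == some c then t ++ [Int.ofNat k] else t) tmp
      = pvScan pre.length l c tmp := by
  induction l with
  | nil => intro pre tmp; simp [pvScan]
  | cons x xs ih =>
    intro pre tmp
    rw [List.length_cons, List.range'_succ, List.foldl_cons]
    have hx : (pre ++ x :: xs)[pre.length]? = some x := by
      rw [List.getElem?_append_right (Nat.le_refl _)]
      simp
    rw [hx]
    have hb : ((some x == some c)) = (x == c) := rfl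
    rw [hb]
    have h2 := ih (pre ++ [x]) (if x == c then tmp ++ [Int.ofNat pre.length] else tmp)
    simp only [List.length_append, List.length_cons, List.length_nil, List.append_assoc,
      List.cons_append, List.nil_append] at h2
    simp only [pvScan, Int.ofNat_eq_natCast] at h2 ⊢
    exact h2

theorem pvCharA_eq_scan (c : Char) : pvCharA c = pvScan 0 pvDecodes.toList c [] := by
  have hr : PySem.List.pyRange 0 64 1 = (List.range' 0 64).map (fun k : Nat => (k : Int)) := by
    decide
  have hlen : pvDecodes.toList.length = 64 := by decide
  unfold pvCharA
  rw [hr, List.foldl_map]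
  have h := pvFoldScan pvDecodes.toList c [] []
  simp only [List.nil_append, List.length_nil, hlen, Int.ofNat_eq_natCast] at h
  simpa using h

set_option maxRecDepth 40000 in
theorem pvCharAB_fin :
    ∀ n : Fin 127, pvScan 0 pvDecodes.toList (Char.ofNat n.val) [] = pvCharB (Char.ofNat n.val) := by
  decide

theorem pvCharAB (c : Char) (h : pvDomChar c = true) : pvCharA c = pvCharB c := by
  have hlt : c.toNat < 127 := by
    simp [pvDomChar] at h
    omega
  have := pvCharAB_fin ⟨c.toNat, hlt⟩
  rw [pvCharA_eq_scan]
  simpa [Char.ofNat_toNat] using this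

theorem pvFold_shift (p : Int → Bool) (l : List Int) (tmp : List Int) :
    l.foldl (fun t i => if p i then t ++ [i] else t) tmp
      = tmp ++ l.foldl (fun t i => if p i then t ++ [i] else t) [] := by
  induction l generalizing tmp with
  | nil => simp
  | cons x xs ih =>
    simp only [List.foldl_cons, List.nil_append]
    by_cases h : p x = true
    · rw [if_pos h, if_pos h, ih (tmp ++ [x]), ih [x], List.append_assoc]
    · rw [if_neg h, if_neg h, ih tmp]

theorem pvStepA_eq (c : Char) (tmp : List Int) :
    (PySem.List.pyRange 0 64 1).foldl (fun t i =>
        if PySem.Str.pyGet? pvDecodes i == some c then t ++ [i] else t) tmp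
      = tmp ++ pvCharA c := by
  have := pvFold_shift (fun i => PySem.Str.pyGet? pvDecodes i == some c)
    (PySem.List.pyRange 0 64 1) tmp
  simpa [pvCharA] using this

theorem pvStepB_eq (c : Char) (tmp : List Int) :
    (if 'A' ≤ c ∧ c ≤ 'Z' then tmp ++ [(c.toNat : Int) - 65]
      else if 'a' ≤ c ∧ c ≤ 'z' then tmp ++ [(c.toNat : Int) - 97 + 26]
      else if '0' ≤ c ∧ c ≤ '9' then tmp ++ [(c.toNat : Int) - 48 + 52]
      else if c = '+' then tmp ++ [62]
      else if c = '/' then tmp ++ [63]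
      else tmp)
      = tmp ++ pvCharB c := by
  unfold pvCharB
  split_ifs <;> simp

theorem pvInner_eq (cs : List Char) (h : cs.all pvDomChar = true) :
    (∀ acc : List Int,
      cs.foldl (fun tmp char =>
        (PySem.List.pyRange 0 64 1).foldl (fun tmp i =>
          if PySem.Str.pyGet? pvDecodes i == some char then tmp ++ [i] else tmp) tmp) acc
      = cs.foldl (fun tmp c =>
          if 'A' ≤ c ∧ c ≤ 'Z' then tmp ++ [(c.toNat : Int) - 65]
          else if 'a' ≤ c ∧ c ≤ 'z' then tmp ++ [(c.toNat : Int) - 97 + 26]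
          else if '0' ≤ c ∧ c ≤ '9' then tmp ++ [(c.toNat : Int) - 48 + 52]
          else if c = '+' then tmp ++ [62]
          else if c = '/' then tmp ++ [63]
          else tmp) acc) := by
  induction cs with
  | nil => intro acc; rfl
  | cons c cs ih =>
    intro acc
    simp only [List.all_cons, Bool.and_eq_true] at h
    simp only [List.foldl_cons]
    rw [pvStepA_eq, pvStepB_eq, pvCharAB c h.1]
    exact ih h.2 _


-- ===== VERDICT (by name: the statement is the Claim_ definition above) =====
theorem decoding_4words_spec : Claim_equal_decoding_4words := by
  intro arr hdom
  unfold Spec_decoding_4words decoding_4words decoding_4words_alt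
  unfold Dom_decoding_4words at hdom
  have : ∀ (acc : List (List Int)) (l : List String), l.all pvDomStr = true →
      l.foldl (fun result words =>
        result ++ [words.toList.foldl (fun tmp char =>
          (PySem.List.pyRange 0 64 1).foldl (fun tmp i =>
            if PySem.Str.pyGet? pvDecodes i == some char then tmp ++ [i] else tmp) tmp) []]) acc
      = l.foldl (fun result words =>
          result ++ [words.toList.foldl (fun tmp c =>
            if 'A' ≤ c ∧ c ≤ 'Z' then tmp ++ [(c.toNat : Int) - 65]
            else if 'a' ≤ c ∧ c ≤ 'z' then tmp ++ [(c.toNat : Int) - 97 + 26]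
            else if '0' ≤ c ∧ c ≤ '9' then tmp ++ [(c.toNat : Int) - 48 + 52]
            else if c = '+' then tmp ++ [62]
            else if c = '/' then tmp ++ [63]
            else tmp) []]) acc := by
    intro acc l
    induction l generalizing acc with
    | nil => intro _; rfl
    | cons w ws ih =>
      intro hl
      simp only [List.all_cons, Bool.and_eq_true] at hl
      simp only [List.foldl_cons]
      rw [pvInner_eq w.toList hl.1 []]
      exact ih _ hl.2
  exact this [] arr hdom
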